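-- pv_equiv track=rewrite | github.com/PriorLabs/TabPFN | src/tabpfn/inference_tuning.py | get_default_tuning_holdout_n_splits
-- ===== SOURCE A (Python) =====
-- def get_default_tuning_holdout_n_splits(n_samples: int) -> int:
--     """Gets the default tuning holdout number of splits based on a heuristic.
--
--     We aim to tradeoff between computational cost and accuracy.
--     """
--     n_samples_to_splits = {
--         2_000: 10,
--         5_000: 5,
--         10_000: 3,
--         20_000: 2,
--         50_000: 1,
--     }
--     for n_samples_threshold, n_splits in n_samples_to_splits.items():
--         if n_samples <= n_samples_threshold:
--             return n_splits
--     return 1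
-- ===== SOURCE B (Python) =====
-- import bisect
--
-- _THRESHOLDS = [2_000, 5_000, 10_000, 20_000, 50_000]
-- _SPLITS = [10, 5, 3, 2, 1, 1]
--
--
-- def get_default_tuning_holdout_n_splits(n_samples: int) -> int:
--     """Gets the default tuning holdout number of splits based on a heuristic.
--
--     We aim to tradeoff between computational cost and accuracy.
--     """
--     return _SPLITS[bisect.bisect_left(_THRESHOLDS, n_samples)]
-- ===== Notes on version B (the rewrite author's own statement) =====
-- stated objective: idiomatic
-- what changed: Replaces the linear scan over a dict of thresholds with a binary search (bisect.bisect_left) into a sorted threshold table indexing a parallel results table.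
import Mathlib
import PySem

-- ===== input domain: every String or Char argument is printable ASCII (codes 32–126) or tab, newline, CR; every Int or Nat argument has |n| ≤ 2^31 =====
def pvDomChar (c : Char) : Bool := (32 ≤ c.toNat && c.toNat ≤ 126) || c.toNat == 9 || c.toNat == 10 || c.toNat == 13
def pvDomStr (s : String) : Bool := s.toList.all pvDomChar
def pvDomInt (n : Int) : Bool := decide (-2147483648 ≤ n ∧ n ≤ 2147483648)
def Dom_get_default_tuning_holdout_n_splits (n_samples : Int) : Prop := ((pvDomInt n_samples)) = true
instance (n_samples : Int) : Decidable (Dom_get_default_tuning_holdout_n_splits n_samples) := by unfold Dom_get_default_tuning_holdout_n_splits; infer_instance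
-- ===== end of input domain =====

-- B replaces A's linear scan over a threshold dict with a bisect_left binary search into a sorted
-- threshold table and a parallel results table (objective: idiomatic).


-- ===== PORT A =====
-- first (threshold, splits) pair with n_samples <= threshold, in dict insertion order; else 1
def pvScanA (n_samples : Int) : List (Int × Int) → Int
  | [] => 1
  | (t, s) :: rest => if n_samples ≤ t then s else pvScanA n_samples rest

def get_default_tuning_holdout_n_splits (n_samples : Int) : Int :=
  pvScanA n_samples [(2000, 10), (5000, 5), (10000, 3), (20000, 2), (50000, 1)]

-- ===== PORT B =====
-- transliteration of bisect.bisect_left(xs, x) with bounds lo, hi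
def pvBisectLeft (xs : List Int) (x : Int) (lo hi : Nat) : Nat :=
  if _h : lo < hi then
    let mid := (lo + hi) / 2
    if xs.getD mid 0 < x then pvBisectLeft xs x (mid + 1) hi
    else pvBisectLeft xs x lo mid
  else lo
termination_by hi - lo
decreasing_by all_goals omega

def pvThresholds : List Int := [2000, 5000, 10000, 20000, 50000]
def pvSplits : List Int := [10, 5, 3, 2, 1, 1]

def get_default_tuning_holdout_n_splits_alt (n_samples : Int) : Int :=
  pvSplits.getD (pvBisectLeft pvThresholds n_samples 0 pvThresholds.length) 0

-- ===== PRECONDITION & SPEC =====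
def Spec_get_default_tuning_holdout_n_splits (n_samples : Int) (out : Int) : Prop := out = get_default_tuning_holdout_n_splits_alt n_samples
instance (n_samples : Int) (out : Int) : Decidable (Spec_get_default_tuning_holdout_n_splits n_samples out) := by unfold Spec_get_default_tuning_holdout_n_splits; infer_instance

-- ===== CLAIM (what is proved, stated in full; the proofs are below) =====
def Claim_equal_get_default_tuning_holdout_n_splits : Prop := ∀ (n_samples : Int), Dom_get_default_tuning_holdout_n_splits n_samples → Spec_get_default_tuning_holdout_n_splits n_samples (get_default_tuning_holdout_n_splits n_samples)

-- ===== LEMMAS AND PROOFS =====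

-- ===== VERDICT (by name: the statement is the Claim_ definition above) =====
theorem get_default_tuning_holdout_n_splits_spec : Claim_equal_get_default_tuning_holdout_n_splits := by
  intro n _
  show _ = _
  simp only [get_default_tuning_holdout_n_splits, get_default_tuning_holdout_n_splits_alt,
    pvThresholds, pvSplits, pvScanA, List.length]
  repeat (rw [pvBisectLeft.eq_def]; norm_num [List.getD])
  split_ifs <;> first | (simp; done) | omega
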